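-- pv_equiv track=rewrite | github.com/svend4/meta | projects/hexdim/hexdim.py | q6_to_grid_coords
-- ===== SOURCE A (Python) =====
-- def _popcount(x):
--     c = 0
--     while x:
--         c += x & 1
--         x >>= 1
--     return c
--
-- def trigram_decomposition(h):
--     """
--     Разложить гексаграмму h на (нижнюю, верхнюю) триграммы.
--
--     Нижняя триграмма (земля): биты 0,1,2 → {0..7}
--     Верхняя триграмма (небо): биты 3,4,5 → {0..7}
--
--     Q6 = Q3_lower × Q3_upper — классическая структура И-Цзин.
--     """
--     lower = h & 7          # биты 0-2
--     upper = (h >> 3) & 7   # биты 3-5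
--     return lower, upper
--
-- def q6_to_grid_coords(h, method='trigram'):
--     """
--     Отобразить вершину h в 2D-координаты для визуализации.
--
--     Методы:
--       'trigram' : (lower_trigram, upper_trigram) — 8×8 сетка
--       'yang'    : (yang_count, value_within_level) — треугольная форма
--       'gray'    : (gray_row, gray_col) — упорядочение по коду Грея
--     """
--     if method == 'trigram':
--         lower, upper = trigram_decomposition(h)
--         return lower, upper  # 0..7 × 0..7
--
--     elif method == 'yang':
--         w = _popcount(h)
--         # Внутри уровня yang_count=w: порядковый номер среди вершин того же веса
--         same_weight = sorted(v for v in range(64) if _popcount(v) == w)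
--         pos = same_weight.index(h)
--         return w, pos
--
--     elif method == 'gray':
--         # Код Грея: i → i ⊕ (i >> 1)
--         gray_order = [i ^ (i >> 1) for i in range(64)]
--         pos = gray_order.index(h)
--         return pos // 8, pos % 8
--
--     else:
--         raise ValueError(f"Unknown method: {method}")
-- ===== SOURCE B (Python) =====
-- def _popcount(x):
--     c = 0
--     while x:
--         c += x & 1
--         x >>= 1
--     return c
--
-- def _binom(n, k):
--     if k < 0 or k > n:
--         return 0
--     r = 1
--     for i in range(k):
--         r = r * (n - i) // (i + 1)
--     return r
--
-- def q6_to_grid_coords(h, method='trigram'):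
--     if method == 'trigram':
--         return h & 7, (h >> 3) & 7
--     elif method == 'yang':
--         if not 0 <= h < 64:
--             raise ValueError(f"hexagram out of range: {h}")
--         w = _popcount(h)
--         # combinatorial rank of h among the weight-w values of 0..63
--         pos, k = 0, w
--         for i in range(5, -1, -1):
--             if (h >> i) & 1:
--                 pos += _binom(i, k)
--                 k -= 1
--         return w, pos
--     elif method == 'gray':
--         if not 0 <= h < 64:
--             raise ValueError(f"hexagram out of range: {h}")
--         g = h
--         g ^= g >> 1
--         g ^= g >> 2
--         g ^= g >> 4
--         return g // 8, g % 8
--     else: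
--         raise ValueError(f"Unknown method: {method}")
-- ===== Notes on version B (the rewrite author's own statement) =====
-- stated objective: idiomatic
-- what changed: The 'gray' branch inverts the Gray code arithmetically (g^=g>>1; g^=g>>2; g^=g>>4) and the 'yang' branch computes the combinatorial rank of h among weight-w values via binomial coefficients, instead of materialising 64-element lists and calling .index; out-of-range h raises ValueError via an explicit guard.
import Mathlib
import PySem

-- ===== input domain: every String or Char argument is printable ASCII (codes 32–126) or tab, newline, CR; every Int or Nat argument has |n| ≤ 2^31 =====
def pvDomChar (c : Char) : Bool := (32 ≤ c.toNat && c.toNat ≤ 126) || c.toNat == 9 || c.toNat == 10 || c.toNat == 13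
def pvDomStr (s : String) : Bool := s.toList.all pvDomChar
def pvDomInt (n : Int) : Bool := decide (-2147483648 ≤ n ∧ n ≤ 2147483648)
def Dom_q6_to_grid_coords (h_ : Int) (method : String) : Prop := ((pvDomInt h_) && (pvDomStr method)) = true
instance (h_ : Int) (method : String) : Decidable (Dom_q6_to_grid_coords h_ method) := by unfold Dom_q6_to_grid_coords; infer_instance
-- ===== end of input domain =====

-- B: the 'gray' branch inverts the Gray code arithmetically and the 'yang' branch computes a
-- combinatorial rank via binomial coefficients, instead of building 64-element lists and .index.


-- ===== PORT A =====
-- _popcount: Python's 'while x:' loop; it diverges for x < 0 (outside Pre_), so the port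
-- recurses only while 0 < x — exact for every x ≥ 0, where Python returns.
-- fuel-guarded structural recursion (kernel-reducible); x.toNat+1 iterations always suffice
-- for x ≥ 0, where the Python loop terminates.
def pyPopcountGo : Nat → Int → Int → Int
  | 0, _, c => c
  | fuel + 1, x, c => if x ≠ 0 then pyPopcountGo fuel (x >>> (1 : Nat)) (c + PySem.Int.band x 1) else c

def pyPopcount (x : Int) : Int := pyPopcountGo (x.toNat + 1) x 0

def trigram_decomposition (h : Int) : Int × Int := (PySem.Int.band h 7, PySem.Int.band (h >>> (3:Nat)) 7)

def q6_to_grid_coords (h_ : Int) (method : String) : Int × Int :=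
  if method = "trigram" then
    trigram_decomposition h_
  else if method = "yang" then
    let w := pyPopcount h_
    let same_weight := PySem.List.sorted ((PySem.List.pyRange 0 64 1).filter (fun v => pyPopcount v == w)) id false
    -- .index raises ValueError when h_ is absent (outside Pre_); getD 0 stands for the raise
    let pos : Int := ((PySem.List.index? same_weight h_).getD 0 : Nat)
    (w, pos)
  else if method = "gray" then
    let gray_order := (PySem.List.pyRange 0 64 1).map (fun i => PySem.Int.bxor i (i >>> (1:Nat)))
    let pos : Int := ((PySem.List.index? gray_order h_).getD 0 : Nat)
    (PySem.Int.floordiv pos 8, PySem.Int.mod pos 8)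
  else
    (0, 0)  -- raise ValueError (outside Pre_)

-- ===== PORT B =====
def binomB (n k : Int) : Int :=
  if k < 0 ∨ n < k then 0
  else (PySem.List.pyRange 0 k 1).foldl (fun r i => PySem.Int.floordiv (r * (n - i)) (i + 1)) 1

def q6_to_grid_coords_alt (h_ : Int) (method : String) : Int × Int :=
  if method = "trigram" then
    (PySem.Int.band h_ 7, PySem.Int.band (h_ >>> (3:Nat)) 7)
  else if method = "yang" then
    let w := pyPopcount h_  -- B reuses the module's _popcount
    let pk := (PySem.List.pyRange 5 (-1) (-1)).foldl
      (fun (pk : Int × Int) i =>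
        if PySem.Int.band (h_ >>> i.toNat) 1 ≠ 0 then (pk.1 + binomB i pk.2, pk.2 - 1) else pk)
      (0, w)
    (w, pk.1)
  else if method = "gray" then
    let g1 := PySem.Int.bxor h_ (h_ >>> (1:Nat))
    let g2 := PySem.Int.bxor g1 (g1 >>> (2:Nat))
    let g3 := PySem.Int.bxor g2 (g2 >>> (4:Nat))
    (PySem.Int.floordiv g3 8, PySem.Int.mod g3 8)
  else
    (0, 0)  -- raise ValueError (outside Pre_)

-- ===== PRECONDITION & SPEC =====
-- A raises ValueError on an unknown method and (via .index) on h_ outside 0..63 for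
-- 'yang'/'gray', and _popcount diverges for negative h_ with 'yang': exactly those are excluded.
def Pre_q6_to_grid_coords (h_ : Int) (method : String) : Prop :=
  method = "trigram" ∨ ((method = "yang" ∨ method = "gray") ∧ 0 ≤ h_ ∧ h_ < 64)
instance (h_ : Int) (method : String) : Decidable (Pre_q6_to_grid_coords h_ method) := by
  unfold Pre_q6_to_grid_coords; infer_instance
def pvWitness_q6_to_grid_coords : Int × String := (42, "yang")

def Spec_q6_to_grid_coords (h_ : Int) (method : String) (out : Int × Int) : Prop := out = q6_to_grid_coords_alt h_ method
instance (h_ : Int) (method : String) (out : Int × Int) : Decidable (Spec_q6_to_grid_coords h_ method out) := by unfold Spec_q6_to_grid_coords; infer_instance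

-- ===== CLAIM (what is proved, stated in full; the proofs are below) =====
def Claim_equal_q6_to_grid_coords : Prop := ∀ (h_ : Int) (method : String), Dom_q6_to_grid_coords h_ method → Pre_q6_to_grid_coords h_ method → Spec_q6_to_grid_coords h_ method (q6_to_grid_coords h_ method)

-- ===== LEMMAS AND PROOFS =====
set_option maxHeartbeats 2000000 in
theorem small_agree : ∀ n : Nat, n < 64 →
    (q6_to_grid_coords (n : Int) "yang" = q6_to_grid_coords_alt (n : Int) "yang" ∧
     q6_to_grid_coords (n : Int) "gray" = q6_to_grid_coords_alt (n : Int) "gray") := by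
  decide

-- ===== VERDICT (by name: the statement is the Claim_ definition above) =====
theorem q6_to_grid_coords_spec : Claim_equal_q6_to_grid_coords := by
  intro h_ method _ hpre
  unfold Spec_q6_to_grid_coords
  rcases hpre with htri | ⟨hm, h0, h64⟩
  · subst htri
    simp [q6_to_grid_coords, q6_to_grid_coords_alt, trigram_decomposition]
  · have hn : h_ = ((h_.toNat : Int)) := by omega
    have hlt : h_.toNat < 64 := by omega
    have := small_agree h_.toNat hlt
    rcases hm with hy | hg
    · subst hy; rw [hn]; exact this.1
    · subst hg; rw [hn]; exact this.2
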